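-- pv_equiv track=rewrite | github.com/Minerstove/Python | MockHope1/1j.py | proper_substring_pairs
-- ===== SOURCE A (Python) =====
-- def proper_substring_pairs(strings):
--     if not strings:
--         return frozenset()
--     if len(strings) == 1:
--         return frozenset()
--
--     return frozenset(
--         (strings[i], strings[j])
--         for i in range(len(strings))
--         for j in range(len(strings))
--         if i != j
--         and strings[j] in strings[i]
--         and len(strings[j]) < len(strings[i])
--     )
-- ===== SOURCE B (Python) =====
-- def proper_substring_pairs(strings):
--     pairs = []
--     for x in strings:
--         n = len(x)
--         subs = {x[i:j] for i in range(n + 1) for j in range(i, n + 1)}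
--         subs.discard(x)
--         for t in strings:
--             if t in subs:
--                 pairs.append((x, t))
--     return frozenset(pairs)
-- ===== Notes on version B (the rewrite author's own statement) =====
-- stated objective: faster
-- what changed: B inverts the containment test: for each string x it enumerates the hash set of all proper slices x[i:j] once and then emits (x,t) for input strings t found by O(1) set lookup, instead of A's all-pairs index loop running a substring search for every ordered pair.
import Mathlib
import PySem

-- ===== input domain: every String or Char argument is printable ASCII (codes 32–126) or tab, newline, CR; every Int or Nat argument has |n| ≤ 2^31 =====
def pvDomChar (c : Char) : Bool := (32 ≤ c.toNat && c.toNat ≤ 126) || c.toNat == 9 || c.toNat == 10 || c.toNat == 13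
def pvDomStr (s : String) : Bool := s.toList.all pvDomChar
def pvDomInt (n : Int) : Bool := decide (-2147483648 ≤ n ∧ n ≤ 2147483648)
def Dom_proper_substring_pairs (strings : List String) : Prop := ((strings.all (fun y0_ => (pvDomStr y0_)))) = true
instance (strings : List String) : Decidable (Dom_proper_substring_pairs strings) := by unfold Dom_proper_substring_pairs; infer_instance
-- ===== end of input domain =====

-- B enumerates, per string x, the hash set of all proper slices x[i:j] once and then tests each
-- input string for membership, replacing A's all-pairs index loop with a substring search per pair.

-- ===== PORT A =====
def proper_substring_pairs (strings : List String) : List (String × String) :=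
  if strings = [] then []
  else if strings.length = 1 then []
  else
    PySem.Set.ofList (
      (PySem.List.pyRange 0 (strings.length : Int) 1).flatMap (fun i =>
        (PySem.List.pyRange 0 (strings.length : Int) 1).filterMap (fun j =>
          if i ≠ j ∧
             PySem.Str.isIn (PySem.List.pyGetD strings j "") (PySem.List.pyGetD strings i "") = true ∧
             PySem.Str.len (PySem.List.pyGetD strings j "") < PySem.Str.len (PySem.List.pyGetD strings i "")
          then some (PySem.List.pyGetD strings i "", PySem.List.pyGetD strings j "")
          else none)))

-- ===== PORT B =====
-- subs = {x[i:j] for i in range(n+1) for j in range(i, n+1)}; subs.discard(x)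
def pvSubs (x : String) : PySem.Set String :=
  PySem.Set.discard
    (PySem.Set.ofList (
      (PySem.List.pyRange 0 ((PySem.Str.len x : Int) + 1) 1).flatMap (fun i =>
        (PySem.List.pyRange i ((PySem.Str.len x : Int) + 1) 1).map (fun j =>
          PySem.Str.slice x (some i) (some j))))) x

def proper_substring_pairs_alt (strings : List String) : List (String × String) :=
  PySem.Set.ofList (
    strings.flatMap (fun x =>
      let subs := pvSubs x
      strings.filterMap (fun t =>
        if PySem.Set.contains subs t = true then some (x, t) else none)))

-- ===== PRECONDITION & SPEC =====
def Spec_proper_substring_pairs (strings : List String) (out : List (String × String)) : Prop := out = proper_substring_pairs_alt strings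
instance (strings : List String) (out : List (String × String)) : Decidable (Spec_proper_substring_pairs strings out) := by unfold Spec_proper_substring_pairs; infer_instance

-- ===== CLAIM (what is proved, stated in full; the proofs are below) =====
def Claim_equal_proper_substring_pairs : Prop := ∀ (strings : List String), Dom_proper_substring_pairs strings → Spec_proper_substring_pairs strings (proper_substring_pairs strings)

-- ===== LEMMAS AND PROOFS =====

-- the pair-producing test, A's inner conditional at the value level
def pvG (x y : String) : Option (String × String) :=
  if PySem.Str.len y < PySem.Str.len x ∧ PySem.Str.isIn y x = true then some (x, y) else none

theorem pvG_self (x : String) : pvG x x = none := by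
  unfold pvG
  split
  · omega
  · rfl

-- membership in the slice set: exactly the proper substrings of x
theorem pvSubs_contains (x t : String) :
    PySem.Set.contains (pvSubs x) t = true ↔
      (PySem.Str.len t < PySem.Str.len x ∧ PySem.Str.isIn t x = true) := by
  unfold pvSubs
  rw [PySem.Set.contains_iff, PySem.Set.mem_discard, PySem.Set.mem_ofList]
  simp only [List.mem_flatMap, List.mem_map, PySem.List.mem_pyRange_one,
    PySem.Str.len_eq, PySem.Str.isIn_eq, PySem.Chars.isIn_iff_infix]
  constructor
  · rintro ⟨⟨i, ⟨hi0, hin⟩, j, ⟨hij, hjn⟩, ht⟩, hne⟩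
    obtain ⟨a, rfl⟩ := Int.eq_ofNat_of_zero_le hi0
    obtain ⟨b, rfl⟩ := Int.eq_ofNat_of_zero_le (le_trans hi0 hij)
    have hts : t.toList = (x.toList.drop a).take (b - a) := by
      rw [← ht]
      simp [PySem.List.slice_natCast]
    have hinf : t.toList <:+: x.toList := by
      rw [hts]
      exact ((x.toList.drop a).take_prefix (b - a)).isInfix.trans (x.toList.drop_suffix a).isInfix
    refine ⟨?_, hinf⟩
    have hle := hinf.length_le
    rcases lt_or_eq_of_le hle with h | h
    · exact_mod_cast h
    · exact absurd (String.ext (hinf.eq_of_length h)) hne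
  · rintro ⟨hlen, hinf⟩
    obtain ⟨u, v, huv⟩ := hinf
    have hxlen : x.toList.length = u.length + t.toList.length + v.length := by
      rw [← huv]; simp; omega
    refine ⟨⟨(u.length : Int), ⟨by positivity, by omega⟩,
            ((u.length + t.toList.length : ℕ) : Int), ⟨by omega, by omega⟩, ?_⟩, ?_⟩
    · apply String.ext
      rw [PySem.Str.toList_slice]
      simp only [PySem.Chars.slice_eq_listSlice, PySem.List.slice_natCast]
      rw [← huv]
      simp
    · intro h
      rw [h] at hlen
      omega

-- B's inner conditional equals A's at every value
theorem pvSubs_inner (x t : String) :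
    (if PySem.Set.contains (pvSubs x) t = true then some (x, t) else none) = pvG x t := by
  unfold pvG
  by_cases h : PySem.Str.len t < PySem.Str.len x ∧ PySem.Str.isIn t x = true
  · rw [if_pos ((pvSubs_contains x t).mpr h), if_pos h]
  · rw [if_neg (fun hc => h ((pvSubs_contains x t).mp hc)), if_neg h]

-- flatMap over a mapped list
theorem pv_flatMap_map {α β γ : Type} (l : List α) (f : α → β) (g : β → List γ) :
    (l.map f).flatMap g = l.flatMap (fun a => g (f a)) := by
  induction l with
  | nil => rfl
  | cons a l ih => simp [ih]

-- an index loop over range(len(xs)) reading xs[j] is the same traversal by value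
theorem pv_filterMap_pyRange {β : Type} (xs : List String) (d : String) (k : String → Option β) :
    (PySem.List.pyRange 0 (xs.length : Int) 1).filterMap (fun j => k (PySem.List.pyGetD xs j d))
      = xs.filterMap k := by
  conv_rhs => rw [← PySem.List.map_pyGetD_pyRange_zero' xs d]
  rw [List.filterMap_map]
  rfl

theorem pv_flatMap_pyRange {β : Type} (xs : List String) (d : String) (k : String → List β) :
    (PySem.List.pyRange 0 (xs.length : Int) 1).flatMap (fun j => k (PySem.List.pyGetD xs j d))
      = xs.flatMap k := by
  conv_rhs => rw [← PySem.List.map_pyGetD_pyRange_zero' xs d]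
  rw [pv_flatMap_map]

-- A's body over indices equals the value-level generator over the raw list
theorem pv_A_body (strings : List String) :
    (PySem.List.pyRange 0 (strings.length : Int) 1).flatMap (fun i =>
      (PySem.List.pyRange 0 (strings.length : Int) 1).filterMap (fun j =>
        if i ≠ j ∧
           PySem.Str.isIn (PySem.List.pyGetD strings j "") (PySem.List.pyGetD strings i "") = true ∧
           PySem.Str.len (PySem.List.pyGetD strings j "") < PySem.Str.len (PySem.List.pyGetD strings i "")
        then some (PySem.List.pyGetD strings i "", PySem.List.pyGetD strings j "")
        else none))
    = strings.flatMap (fun x => strings.filterMap (pvG x)) := by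
  have hstep : ∀ i ∈ PySem.List.pyRange 0 (strings.length : Int) 1,
      (PySem.List.pyRange 0 (strings.length : Int) 1).filterMap (fun j =>
        if i ≠ j ∧
           PySem.Str.isIn (PySem.List.pyGetD strings j "") (PySem.List.pyGetD strings i "") = true ∧
           PySem.Str.len (PySem.List.pyGetD strings j "") < PySem.Str.len (PySem.List.pyGetD strings i "")
        then some (PySem.List.pyGetD strings i "", PySem.List.pyGetD strings j "")
        else none)
      = strings.filterMap (pvG (PySem.List.pyGetD strings i "")) := by
    intro i _
    have hcongr : ∀ j ∈ PySem.List.pyRange 0 (strings.length : Int) 1,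
        (if i ≠ j ∧
            PySem.Str.isIn (PySem.List.pyGetD strings j "") (PySem.List.pyGetD strings i "") = true ∧
            PySem.Str.len (PySem.List.pyGetD strings j "") < PySem.Str.len (PySem.List.pyGetD strings i "")
         then some (PySem.List.pyGetD strings i "", PySem.List.pyGetD strings j "")
         else none)
        = pvG (PySem.List.pyGetD strings i "") (PySem.List.pyGetD strings j "") := by
      intro j _
      by_cases hij : i = j
      · subst hij
        rw [pvG_self, if_neg]
        rintro ⟨hne, -, -⟩
        exact hne rfl
      · unfold pvG
        split_ifs with h1 h2 h2 <;> first | rfl | (exfalso; tauto)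
    rw [List.filterMap_congr hcongr, pv_filterMap_pyRange]
  rw [List.flatMap_congr hstep]
  exact pv_flatMap_pyRange strings "" (fun x => strings.filterMap (pvG x))

-- B's body equals the same value-level generator
theorem pv_B_body (strings : List String) :
    strings.flatMap (fun x =>
      strings.filterMap (fun t =>
        if PySem.Set.contains (pvSubs x) t = true then some (x, t) else none))
    = strings.flatMap (fun x => strings.filterMap (pvG x)) := by
  apply List.flatMap_congr
  intro x _
  exact List.filterMap_congr (fun t _ => pvSubs_inner x t)

-- ===== VERDICT (by name: the statement is the Claim_ definition above) =====
theorem proper_substring_pairs_spec : Claim_equal_proper_substring_pairs := by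
  intro strings _
  unfold Spec_proper_substring_pairs proper_substring_pairs proper_substring_pairs_alt
  simp only []
  rw [show (strings.flatMap (fun x =>
        let subs := pvSubs x
        strings.filterMap (fun t =>
          if PySem.Set.contains subs t = true then some (x, t) else none)))
      = strings.flatMap (fun x => strings.filterMap (pvG x)) from pv_B_body strings]
  split_ifs with h0 h1
  · subst h0; rfl
  · obtain ⟨x, hx⟩ := List.length_eq_one_iff.mp h1
    subst hx
    simp only [List.flatMap_cons, List.flatMap_nil, List.append_nil, List.filterMap_cons,
      List.filterMap_nil, pvG_self]
    rfl
  · rw [pv_A_body]
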